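-- pv_equiv track=rewrite | github.com/mkodithuwakku/ECE493Lab2 | backend/src/services/draft_validation.py | _contains_unsupported_characters
-- ===== SOURCE A (Python) =====
-- def _contains_unsupported_characters(values: list[str]) -> bool:
--     for value in values:
--         for char in value:
--             if char in "<>":
--                 return True
--             if ord(char) < 32 and char not in "\n\r\t":
--                 return True
--             if not char.isprintable() and char not in "\n\r\t":
--                 return True
--     return False
-- ===== SOURCE B (Python) =====
-- def _contains_unsupported_characters(values: list[str]) -> bool:
--     chars = set()
--     for value in values:
--         chars.update(value)
--     return any(
--         c in "<>" or (not c.isprintable() and c not in "\n\r\t")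
--         for c in chars
--     )
-- ===== Notes on version B (the rewrite author's own statement) =====
-- stated objective: simpler
-- what changed: Replaces the nested early-returning char-by-char scan with building the set of distinct characters once (chars.update per value) and a single any() pass over that set, dropping the ord<32 branch that the isprintable test subsumes.
import Mathlib
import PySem

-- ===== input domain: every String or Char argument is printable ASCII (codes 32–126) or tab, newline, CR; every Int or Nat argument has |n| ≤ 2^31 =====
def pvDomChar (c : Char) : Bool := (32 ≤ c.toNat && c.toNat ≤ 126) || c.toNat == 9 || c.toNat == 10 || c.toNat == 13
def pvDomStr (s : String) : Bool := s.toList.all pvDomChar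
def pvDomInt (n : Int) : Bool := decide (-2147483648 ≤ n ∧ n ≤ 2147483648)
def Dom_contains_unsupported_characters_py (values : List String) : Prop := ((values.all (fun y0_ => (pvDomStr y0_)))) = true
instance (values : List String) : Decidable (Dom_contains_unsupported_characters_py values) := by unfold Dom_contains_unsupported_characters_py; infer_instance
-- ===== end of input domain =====

-- B builds the set of distinct characters once and tests each distinct char with a single any() pass
-- (dropping the ord<32 branch that the isprintable test subsumes) — objective: simpler.


-- ===== PORT A =====
-- char.isprintable(), ported by hand: exact for the ASCII + tab/newline/CR characters Dom admits
-- (for ASCII, Python's isprintable is exactly 32 ≤ code ≤ 126).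
def pyIsPrintableAscii (c : Char) : Bool := 32 ≤ c.toNat && c.toNat ≤ 126

def cuc_badA (c : Char) : Bool :=
  if "<>".toList.contains c then true
  else if c.toNat < 32 && !("\n\r\t".toList.contains c) then true
  else if !pyIsPrintableAscii c && !("\n\r\t".toList.contains c) then true
  else false

def contains_unsupported_characters_py (values : List String) : Bool :=
  values.any (fun value => value.toList.any cuc_badA)

-- ===== PORT B =====
def cuc_badB (c : Char) : Bool :=
  "<>".toList.contains c || (!pyIsPrintableAscii c && !("\n\r\t".toList.contains c))

def contains_unsupported_characters_py_alt (values : List String) : Bool :=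
  let chars : PySem.Set Char :=
    values.foldl (fun s value => PySem.Set.update s value.toList) PySem.Set.empty
  chars.any cuc_badB

-- ===== PRECONDITION & SPEC =====
def Spec_contains_unsupported_characters_py (values : List String) (out : Bool) : Prop := out = contains_unsupported_characters_py_alt values
instance (values : List String) (out : Bool) : Decidable (Spec_contains_unsupported_characters_py values out) := by unfold Spec_contains_unsupported_characters_py; infer_instance

-- ===== CLAIM (what is proved, stated in full; the proofs are below) =====
def Claim_equal_contains_unsupported_characters_py : Prop := ∀ (values : List String), Dom_contains_unsupported_characters_py values → Spec_contains_unsupported_characters_py values (contains_unsupported_characters_py values)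

-- ===== LEMMAS AND PROOFS =====

-- membership in the character set B accumulates
theorem cuc_mem_foldl_update (values : List String) (s : PySem.Set Char) (c : Char) :
    c ∈ values.foldl (fun s value => PySem.Set.update s value.toList) s ↔
      c ∈ s ∨ ∃ v ∈ values, c ∈ v.toList := by
  induction values generalizing s with
  | nil => simp
  | cons v vs ih =>
      simp [List.foldl_cons, ih, PySem.Set.mem_update]
      tauto

-- the two per-character tests agree: A's ord < 32 branch is subsumed by the isprintable branch
theorem cuc_bad_eq (c : Char) : cuc_badA c = cuc_badB c := by
  unfold cuc_badA cuc_badB pyIsPrintableAscii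
  split_ifs with h1 h2 h3 <;> simp_all [List.contains_eq_mem, Char.ext_iff]

theorem contains_unsupported_characters_py_spec' (values : List String)
    (_hd : Dom_contains_unsupported_characters_py values) :
    contains_unsupported_characters_py values = contains_unsupported_characters_py_alt values := by
  unfold contains_unsupported_characters_py contains_unsupported_characters_py_alt
  rw [Bool.eq_iff_iff]
  simp only [List.any_eq_true, cuc_mem_foldl_update, PySem.Set.empty]
  constructor
  · rintro ⟨v, hv, c, hc, hbad⟩
    exact ⟨c, Or.inr ⟨v, hv, hc⟩, cuc_bad_eq c ▸ hbad⟩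
  · rintro ⟨c, hc, hbad⟩
    rcases hc with hc | ⟨v, hv, hc⟩
    · simp at hc
    · exact ⟨v, hv, c, hc, (cuc_bad_eq c).symm ▸ hbad⟩

-- ===== VERDICT (by name: the statement is the Claim_ definition above) =====
theorem contains_unsupported_characters_py_spec : Claim_equal_contains_unsupported_characters_py := by
  intro values hd
  exact contains_unsupported_characters_py_spec' values hd
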